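-- pv_equiv track=rewrite | github.com/uustortoise/Beta_6 | backend/intelligence/context/classifier.py | _consolidate_episodes
-- ===== SOURCE A (Python) =====
-- from typing import List, Dict, Optional, Tuple
--
-- def _consolidate_episodes(episodes: List[Dict]) -> List[Dict]:
--     """Merge consecutive episodes with same label."""
--     if not episodes:
--         return []
--
--     merged = []
--     current = episodes[0].copy()
--
--     for next_ep in episodes[1:]:
--         if next_ep['context_label'] == current['context_label']:
--             # Extend current
--             current['end_time'] = next_ep['end_time']
--             # Aggregate features / confidence if needed
--         else:
--             merged.append(current)
--             current = next_ep.copy()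
--
--     merged.append(current)
--     return merged
-- ===== SOURCE B (Python) =====
-- from typing import List, Dict
--
-- def _consolidate_episodes(episodes: List[Dict]) -> List[Dict]:
--     """Merge consecutive episodes with same label: scan each maximal
--     same-label run, emit a copy of its first episode, with end_time
--     taken from the run's last episode when the run has length > 1."""
--     merged = []
--     i, n = 0, len(episodes)
--     while i < n:
--         j = i + 1
--         while j < n and episodes[j]['context_label'] == episodes[i]['context_label']:
--             j += 1
--         rep = episodes[i].copy()
--         if j - i > 1:
--             rep['end_time'] = episodes[j - 1]['end_time']
--         merged.append(rep)
--         i = j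
--     return merged
-- ===== Notes on version B (the rewrite author's own statement) =====
-- stated objective: alternative
-- what changed: B replaces A's running-current accumulator (which rewrites end_time once per successor) with a two-phase run scanner: it finds each maximal same-label run first and emits one merged dict per run, touching end_time at most once (from the run's last episode).
import Mathlib
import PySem

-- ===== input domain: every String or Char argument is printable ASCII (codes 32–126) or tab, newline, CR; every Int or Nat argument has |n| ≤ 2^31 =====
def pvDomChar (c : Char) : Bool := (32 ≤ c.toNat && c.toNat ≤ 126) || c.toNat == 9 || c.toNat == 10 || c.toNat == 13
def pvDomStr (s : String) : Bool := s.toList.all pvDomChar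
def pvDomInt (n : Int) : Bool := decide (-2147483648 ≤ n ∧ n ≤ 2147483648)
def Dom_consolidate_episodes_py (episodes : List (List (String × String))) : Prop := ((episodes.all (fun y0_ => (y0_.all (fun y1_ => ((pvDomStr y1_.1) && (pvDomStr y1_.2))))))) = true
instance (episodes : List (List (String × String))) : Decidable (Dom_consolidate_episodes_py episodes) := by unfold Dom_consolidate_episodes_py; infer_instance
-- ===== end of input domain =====

-- B merges each maximal same-label run in one step (first episode's copy + last episode's end_time)
-- instead of A's running accumulator; alternative decomposition, same cost. Return value only; no mutation.

-- shared dict primitives (episodes are assoc lists; Dict.mk/items bridge to PySem.Dict)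
def pvLbl (d : List (String × String)) : String := (PySem.Dict.mk d).getD "context_label" ""
def pvEt (d : List (String × String)) : String := (PySem.Dict.mk d).getD "end_time" ""
def pvSetEt (d : List (String × String)) (v : String) : List (String × String) :=
  ((PySem.Dict.mk d).insert "end_time" v).items

-- ===== PORT A =====
def consolidate_episodes_py (episodes : List (List (String × String))) : List (List (String × String)) :=
  match episodes with
  | [] => []
  | e0 :: rest =>
    let st := rest.foldl
      (fun (acc : List (List (String × String)) × List (String × String)) next_ep =>
        if pvLbl next_ep = pvLbl acc.2 then (acc.1, pvSetEt acc.2 (pvEt next_ep))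
        else (acc.1 ++ [acc.2], next_ep))
      ([], e0)
    st.1 ++ [st.2]

-- ===== PORT B =====
-- inner while loop of Source B: peel off the maximal prefix whose label equals lbl; return (run, rest)
def pvTakeRun (lbl : String) : List (List (String × String)) → List (List (String × String)) × List (List (String × String))
  | [] => ([], [])
  | e :: es =>
    if pvLbl e = lbl then
      let p := pvTakeRun lbl es
      (e :: p.1, p.2)
    else ([], e :: es)

theorem pvTakeRun_rest_length (lbl : String) : ∀ (es : List (List (String × String))),
    (pvTakeRun lbl es).2.length ≤ es.length
  | [] => Nat.le_refl _
  | e :: es => by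
    simp only [pvTakeRun]
    split
    · exact Nat.le_succ_of_le (pvTakeRun_rest_length lbl es)
    · exact Nat.le_refl _

-- outer while loop of Source B: one merged dict per run
def consolidate_episodes_py_alt : List (List (String × String)) → List (List (String × String))
  | [] => []
  | e :: es =>
    let p := pvTakeRun (pvLbl e) es
    let rep := match p.1.getLast? with
      | none => e
      | some last => pvSetEt e (pvEt last)
    rep :: consolidate_episodes_py_alt p.2
  termination_by l => l.length
  decreasing_by exact Nat.lt_succ_of_le (pvTakeRun_rest_length _ _)

-- ===== PRECONDITION & SPEC =====
-- Pre_ excludes exactly the inputs where the Python A raises KeyError: lists of length ≥ 2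
-- missing 'context_label' somewhere, or an adjacent same-label pair whose second member lacks 'end_time'.
def Pre_consolidate_episodes_py (episodes : List (List (String × String))) : Prop :=
  episodes.length < 2 ∨
    ((∀ ep ∈ episodes, (PySem.Dict.mk ep).contains "context_label" = true) ∧
     (∀ p ∈ episodes.zip episodes.tail, pvLbl p.1 = pvLbl p.2 → (PySem.Dict.mk p.2).contains "end_time" = true))
instance (episodes : List (List (String × String))) : Decidable (Pre_consolidate_episodes_py episodes) := by
  unfold Pre_consolidate_episodes_py; infer_instance

def pvWitness_consolidate_episodes_py : (List (List (String × String))) :=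
  [[("context_label", "a"), ("end_time", "1")], [("context_label", "a"), ("end_time", "2")],
   [("context_label", "b"), ("end_time", "3")]]

def Spec_consolidate_episodes_py (episodes : List (List (String × String))) (out : List (List (String × String))) : Prop := out = consolidate_episodes_py_alt episodes
instance (episodes : List (List (String × String))) (out : List (List (String × String))) : Decidable (Spec_consolidate_episodes_py episodes out) := by unfold Spec_consolidate_episodes_py; infer_instance

-- ===== CLAIM (what is proved, stated in full; the proofs are below) =====
def Claim_equal_consolidate_episodes_py : Prop := ∀ (episodes : List (List (String × String))), Dom_consolidate_episodes_py episodes → Pre_consolidate_episodes_py episodes → Spec_consolidate_episodes_py episodes (consolidate_episodes_py episodes)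

-- ===== LEMMAS AND PROOFS =====

theorem pvLbl_setEt (d : List (String × String)) (v : String) : pvLbl (pvSetEt d v) = pvLbl d := by
  simp only [pvLbl, pvSetEt]
  have : PySem.Dict.mk (((PySem.Dict.mk d).insert "end_time" v).items) =
      (PySem.Dict.mk d).insert "end_time" v := rfl
  rw [this, PySem.Dict.getD_insert_of_ne]
  decide

theorem pvSetEt_setEt (d : List (String × String)) (v w : String) :
    pvSetEt (pvSetEt d v) w = pvSetEt d w := by
  simp only [pvSetEt]
  have h : PySem.Dict.mk (((PySem.Dict.mk d).insert "end_time" v).items) =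
      (PySem.Dict.mk d).insert "end_time" v := rfl
  rw [h, PySem.Dict.insert_insert_self]

-- the merged representative of a run starting at c
def pvRep (c : List (String × String)) (run : List (List (String × String))) : List (String × String) :=
  match run.getLast? with
  | none => c
  | some last => pvSetEt c (pvEt last)

theorem alt_cons (e : List (String × String)) (es : List (List (String × String))) :
    consolidate_episodes_py_alt (e :: es) =
      pvRep e (pvTakeRun (pvLbl e) es).1 :: consolidate_episodes_py_alt (pvTakeRun (pvLbl e) es).2 := by
  rw [consolidate_episodes_py_alt]; rfl

-- continuing B from an open run with representative-so-far c
def pvAltFrom (c : List (String × String)) (es : List (List (String × String))) : List (List (String × String)) :=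
  pvRep c (pvTakeRun (pvLbl c) es).1 :: consolidate_episodes_py_alt (pvTakeRun (pvLbl c) es).2

theorem main_invariant : ∀ (es : List (List (String × String)))
    (merged : List (List (String × String))) (current : List (String × String)),
    (es.foldl
      (fun (acc : List (List (String × String)) × List (String × String)) next_ep =>
        if pvLbl next_ep = pvLbl acc.2 then (acc.1, pvSetEt acc.2 (pvEt next_ep))
        else (acc.1 ++ [acc.2], next_ep))
      (merged, current)).1 ++
    [(es.foldl
      (fun (acc : List (List (String × String)) × List (String × String)) next_ep =>
        if pvLbl next_ep = pvLbl acc.2 then (acc.1, pvSetEt acc.2 (pvEt next_ep))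
        else (acc.1 ++ [acc.2], next_ep))
      (merged, current)).2] = merged ++ pvAltFrom current es
  | [], merged, current => by
    simp [pvAltFrom, pvTakeRun, pvRep, consolidate_episodes_py_alt]
  | e :: es, merged, current => by
    simp only [List.foldl_cons]
    by_cases h : pvLbl e = pvLbl current
    · rw [if_pos h, main_invariant es merged (pvSetEt current (pvEt e))]
      congr 1
      unfold pvAltFrom
      rw [pvLbl_setEt]
      have hrun : pvTakeRun (pvLbl current) (e :: es) =
          (e :: (pvTakeRun (pvLbl current) es).1, (pvTakeRun (pvLbl current) es).2) := by
        simp [pvTakeRun, h]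
      rw [hrun]
      rcases hlast : (pvTakeRun (pvLbl current) es).1.getLast? with _ | last
      · -- run' empty
        rw [List.getLast?_eq_none_iff] at hlast
        simp [pvRep, hlast]
      · -- run' nonempty: last of e :: run' is last
        have hne : (pvTakeRun (pvLbl current) es).1 ≠ [] := by
          intro hnil; rw [hnil] at hlast; simp at hlast
        obtain ⟨x, xs, hx⟩ := List.exists_cons_of_ne_nil hne
        rw [hx] at hlast ⊢
        simp only [pvRep, hlast, List.getLast?_cons_cons, pvSetEt_setEt]
    · rw [if_neg h, main_invariant es (merged ++ [current]) e]
      simp only [pvAltFrom]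
      have hrun : pvTakeRun (pvLbl current) (e :: es) = ([], e :: es) := by
        simp [pvTakeRun, h]
      rw [hrun, alt_cons]
      simp [pvRep, List.append_assoc]

-- ===== VERDICT (by name: the statement is the Claim_ definition above) =====
theorem consolidate_episodes_py_spec : Claim_equal_consolidate_episodes_py := by
  intro episodes _ _
  unfold Spec_consolidate_episodes_py consolidate_episodes_py
  match episodes with
  | [] => simp [consolidate_episodes_py_alt]
  | e0 :: rest =>
    show (rest.foldl _ ([], e0)).1 ++ [(rest.foldl _ ([], e0)).2] = _
    rw [main_invariant rest [] e0, alt_cons]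
    simp [pvAltFrom]
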